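-- pv_equiv track=rewrite | github.com/rimon107/codility | EuclideanAlgorithm/CommonPrimeDivisors/sol.py | prime_reduce
-- ===== SOURCE A (Python) =====
-- def gcd_division(a, b):
--     if not a%b:
--         return b
--     return gcd_division(b, a%b)
--
-- def prime_reduce(n, gcd):
--     na = n // gcd
--     ngcd = gcd_division(na, gcd)
--     if na == 1:
--         return True # success base case
--     elif ngcd == 1:
--         return False
--     return prime_reduce(na, ngcd)
-- ===== SOURCE B (Python) =====
-- def binary_gcd(a, b):
--     # Stein's algorithm: gcd via halving and subtraction, no division/modulo.
--     a, b = abs(a), abs(b)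
--     if a == 0:
--         return b
--     if b == 0:
--         return a
--     k = 0
--     while a % 2 == 0 and b % 2 == 0:
--         a //= 2
--         b //= 2
--         k += 1
--     while a % 2 == 0:
--         a //= 2
--     while b % 2 == 0:
--         b //= 2
--     while b:
--         if a > b:
--             a, b = b, a
--         b = b - a
--         while b and b % 2 == 0:
--             b //= 2
--     return a * 2 ** k
--
-- def prime_reduce(n, gcd):
--     while True:
--         na = n // gcd
--         g = binary_gcd(na, gcd)
--         if na == 1:
--             return True
--         if g == 1:
--             return False
--         n, gcd = na, g
-- ===== Notes on version B (the rewrite author's own statement) =====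
-- stated objective: alternative
-- what changed: Replaces A's recursive modulo-based Euclid helper and recursive outer function by a flat `while True:` loop whose gcd is computed with Stein's binary algorithm (halving and subtraction, no division or modulo).
-- outside the precondition, e.g. on prime_reduce(4, -2): A returns True, B returns False; on prime_reduce(-8, -2): A returns True, B returns True
import Mathlib
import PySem

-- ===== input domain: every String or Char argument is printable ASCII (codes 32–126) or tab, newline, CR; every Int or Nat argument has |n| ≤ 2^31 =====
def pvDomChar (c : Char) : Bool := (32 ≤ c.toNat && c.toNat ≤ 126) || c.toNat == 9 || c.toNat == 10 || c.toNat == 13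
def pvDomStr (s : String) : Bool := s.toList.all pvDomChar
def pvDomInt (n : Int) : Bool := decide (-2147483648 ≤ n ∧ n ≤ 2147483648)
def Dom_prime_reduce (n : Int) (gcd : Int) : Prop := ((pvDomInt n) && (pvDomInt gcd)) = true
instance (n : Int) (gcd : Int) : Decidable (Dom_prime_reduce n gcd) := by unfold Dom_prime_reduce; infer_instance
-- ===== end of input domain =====

-- B replaces A's recursive modulo-Euclid helper and recursive outer function by a flat
-- `while True:` loop whose gcd is computed by Stein's binary algorithm (halving and
-- subtraction, no division) — objective: alternative algorithm, same asymptotic cost.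

-- ===== PORT A =====
-- gcd_division, fuelled (the Python recursion raises for b = 0; inside Pre_ the
-- second argument is positive and the fuel b.natAbs never runs out — see gcd_divisionF_eq_gcd).
def gcd_divisionF : Nat → Int → Int → Int
  | 0, _, b => b
  | f+1, a, b =>
    if PySem.Int.mod a b = 0 then b
    else gcd_divisionF f b (PySem.Int.mod a b)

def gcd_division (a b : Int) : Int := gcd_divisionF b.natAbs a b

-- prime_reduce, fuelled (the Python recursion diverges e.g. on (0, 2); inside Pre_
-- the recursion depth is < n.natAbs + 2 — see prime_reduceF_eq_alt).
def prime_reduceF : Nat → Int → Int → Bool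
  | 0, _, _ => false
  | f+1, n, g =>
    let na := PySem.Int.floordiv n g
    let ngcd := gcd_division na g
    if na = 1 then true
    else if ngcd = 1 then false
    else prime_reduceF f na ngcd

def prime_reduce (n : Int) (gcd : Int) : Bool := prime_reduceF (n.natAbs + 2) n gcd

-- ===== PORT B =====
-- Source B's `while a % 2 == 0 and b % 2 == 0: a //= 2; b //= 2; k += 1`
-- (fuel a suffices: a halves while positive — see halveBothF_spec)
def halveBothF : Nat → Nat → Nat → Nat → Nat × Nat × Nat
  | 0, a, b, k => (a, b, k)
  | f+1, a, b, k =>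
    if a % 2 = 0 ∧ b % 2 = 0 then halveBothF f (a / 2) (b / 2) (k + 1) else (a, b, k)

-- Source B's `while a % 2 == 0: a //= 2` (fuel a suffices for a > 0)
def halveOddF : Nat → Nat → Nat
  | 0, a => a
  | f+1, a => if a % 2 = 0 then halveOddF f (a / 2) else a

-- Source B's inner `while b and b % 2 == 0: b //= 2` (fuel b suffices)
def halvePosF : Nat → Nat → Nat
  | 0, b => b
  | f+1, b => if b ≠ 0 ∧ b % 2 = 0 then halvePosF f (b / 2) else b

-- Source B's `while b:` subtraction loop (fuel a + b suffices — see subLoopF_gcd)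
def subLoopF : Nat → Nat → Nat → Nat
  | 0, a, _ => a
  | f+1, a, b =>
    if b = 0 then a
    else
      let a' := if a > b then b else a
      let b' := if a > b then a else b
      let d := b' - a'
      subLoopF f a' (halvePosF d d)

-- Source B's binary_gcd (Stein's algorithm); abs(a), abs(b) become natAbs
def binary_gcd (x y : Int) : Int :=
  let a := x.natAbs
  let b := y.natAbs
  if a = 0 then (b : Int)
  else if b = 0 then (a : Int)
  else
    let t := halveBothF a a b 0
    let a1 := halveOddF t.1 t.1
    let b1 := halveOddF t.2.1 t.2.1
    ((subLoopF (a1 + b1) a1 b1) * 2 ^ t.2.2 : Nat)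

-- Source B's outer `while True:` loop, fuelled like A's outer recursion
def prime_reduce_altF : Nat → Int → Int → Bool
  | 0, _, _ => false
  | f+1, n, gc =>
    let na := PySem.Int.floordiv n gc
    let g := binary_gcd na gc
    if na = 1 then true
    else if g = 1 then false
    else prime_reduce_altF f na g

def prime_reduce_alt (n : Int) (gcd : Int) : Bool := prime_reduce_altF (n.natAbs + 2) n gcd

-- ===== PRECONDITION & SPEC =====
-- Pre_ excludes gcd ≤ 0 (gcd = 0 raises ZeroDivisionError in both programs; gcd < 0
-- makes A diverge with RecursionError on part of the inputs) and 0 ≤ n < gcd (there A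
-- reaches the state (0, gcd) and diverges with RecursionError); on every admitted input A returns.
def Pre_prime_reduce (n : Int) (gcd : Int) : Prop := 1 ≤ gcd ∧ (n < 0 ∨ gcd ≤ n)
instance (n : Int) (gcd : Int) : Decidable (Pre_prime_reduce n gcd) := by unfold Pre_prime_reduce; infer_instance
def pvWitness_prime_reduce : Int × Int := (12, 6)

def Spec_prime_reduce (n : Int) (gcd : Int) (out : Bool) : Prop := out = prime_reduce_alt n gcd
instance (n : Int) (gcd : Int) (out : Bool) : Decidable (Spec_prime_reduce n gcd out) := by unfold Spec_prime_reduce; infer_instance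

-- ===== CLAIM (what is proved, stated in full; the proofs are below) =====
def Claim_equal_prime_reduce : Prop := ∀ (n : Int) (gcd : Int), Dom_prime_reduce n gcd → Pre_prime_reduce n gcd → Spec_prime_reduce n gcd (prime_reduce n gcd)

-- ===== LEMMAS AND PROOFS =====

theorem gcd_of_dvd_right (a b : Int) (h : b ∣ a) : Int.gcd a b = b.natAbs := by
  have : b.natAbs ∣ a.natAbs := Int.natAbs_dvd_natAbs.mpr h
  simp [Int.gcd, Nat.gcd_eq_right this]

theorem gcd_step (a b : Int) : Int.gcd b (a % b) = Int.gcd a b := by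
  rw [Int.gcd_comm, Int.gcd_emod]

theorem ediv_neg_of_neg_of_pos (a b : Int) (ha : a < 0) (hb : 0 < b) : a / b < 0 := by
  by_contra h
  have h0 : 0 ≤ a / b := not_lt.mp h
  have h1 := Int.emod_nonneg a (by omega : b ≠ 0)
  have h2 := Int.mul_ediv_add_emod a b
  nlinarith

-- A's recursive Euclid computes Int.gcd (positive second argument, enough fuel)
theorem gcd_divisionF_eq_gcd : ∀ (f : Nat) (a b : Int), 0 < b → b.natAbs ≤ f →
    gcd_divisionF f a b = (Int.gcd a b : Int) := by
  intro f
  induction f with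
  | zero => intro a b hb hf; omega
  | succ f ih =>
    intro a b hb hf
    rw [gcd_divisionF, PySem.Int.mod_eq_emod_of_pos hb]
    by_cases h : a % b = 0
    · rw [if_pos h, gcd_of_dvd_right a b (Int.dvd_of_emod_eq_zero h)]
      omega
    · rw [if_neg h, ih b (a % b) (lt_of_le_of_ne (Int.emod_nonneg a (by omega)) (Ne.symm h))
        (by have h1 := Int.emod_lt_of_pos a hb
            have h2 := Int.emod_nonneg a (show b ≠ 0 by omega); omega)]
      rw [gcd_step a b]

-- dividing an even partner by 2 does not change the gcd with an odd number
theorem gcd_odd_half (a b : Nat) (ha : a % 2 = 1) (hb : b % 2 = 0) :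
    Nat.gcd a (b / 2) = Nat.gcd a b := by
  have hc : Nat.Coprime 2 a := Nat.coprime_two_left.mpr (Nat.odd_iff.mpr ha)
  calc Nat.gcd a (b / 2) = Nat.gcd (b / 2) a := Nat.gcd_comm _ _
    _ = Nat.gcd (2 * (b / 2)) a := (Nat.Coprime.gcd_mul_left_cancel _ hc).symm
    _ = Nat.gcd a (2 * (b / 2)) := Nat.gcd_comm _ _
    _ = Nat.gcd a b := by rw [show 2 * (b / 2) = b by omega]

-- the inner `while b and b % 2 == 0` loop: odd (or zero) result, gcd with an odd number preserved
theorem halvePosF_spec : ∀ (f b : Nat), b ≤ f → 0 < b →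
    0 < halvePosF f b ∧ halvePosF f b % 2 = 1 ∧ halvePosF f b ≤ b ∧
      ∀ a, a % 2 = 1 → Nat.gcd a (halvePosF f b) = Nat.gcd a b := by
  intro f
  induction f with
  | zero => intro b hf hb; omega
  | succ f ih =>
    intro b hf hb
    rw [halvePosF]
    by_cases h : b % 2 = 0
    · rw [if_pos ⟨by omega, h⟩]
      obtain ⟨h1, h2, h3, h4⟩ := ih (b / 2) (by omega) (by omega)
      exact ⟨h1, h2, by omega, fun a ha => by rw [h4 a ha, gcd_odd_half a b ha h]⟩
    · rw [if_neg (by tauto)]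
      exact ⟨hb, by omega, le_refl b, fun a _ => rfl⟩

-- the `while a % 2 == 0` loop: odd positive result, gcd with an odd number preserved
theorem halveOddF_spec : ∀ (f a : Nat), a ≤ f → 0 < a →
    0 < halveOddF f a ∧ halveOddF f a % 2 = 1 ∧
      ∀ c, c % 2 = 1 → Nat.gcd c (halveOddF f a) = Nat.gcd c a := by
  intro f
  induction f with
  | zero => intro a hf ha; omega
  | succ f ih =>
    intro a hf ha
    rw [halveOddF]
    by_cases h : a % 2 = 0
    · rw [if_pos h]
      obtain ⟨h1, h2, h3⟩ := ih (a / 2) (by omega) (by omega)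
      exact ⟨h1, h2, fun c hc => by rw [h3 c hc, gcd_odd_half c a hc h]⟩
    · rw [if_neg h]
      exact ⟨ha, by omega, fun c _ => rfl⟩

theorem halveOddF_of_odd (f a : Nat) (h : a % 2 = 1) : halveOddF f a = a := by
  cases f with
  | zero => rfl
  | succ f => rw [halveOddF, if_neg (by omega)]

-- the joint halving loop: positivity, not-both-even, and the 2^k · gcd invariant
theorem halveBothF_spec : ∀ (f a b k : Nat), a ≤ f → 0 < a → 0 < b →
    0 < (halveBothF f a b k).1 ∧ 0 < (halveBothF f a b k).2.1 ∧
    ((halveBothF f a b k).1 % 2 = 1 ∨ (halveBothF f a b k).2.1 % 2 = 1) ∧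
    2 ^ (halveBothF f a b k).2.2 * Nat.gcd (halveBothF f a b k).1 (halveBothF f a b k).2.1
      = 2 ^ k * Nat.gcd a b := by
  intro f
  induction f with
  | zero => intro a b k hf ha hb; omega
  | succ f ih =>
    intro a b k hf ha hb
    rw [halveBothF]
    by_cases h : a % 2 = 0 ∧ b % 2 = 0
    · rw [if_pos h]
      obtain ⟨hae, hbe⟩ := h
      have hf2 : a / 2 ≤ f := by omega
      obtain ⟨h1, h2, h3, h4⟩ := ih (a / 2) (b / 2) (k + 1) hf2 (by omega) (by omega)
      refine ⟨h1, h2, h3, ?_⟩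
      rw [h4]
      have hgcd : Nat.gcd a b = 2 * Nat.gcd (a / 2) (b / 2) := by
        calc Nat.gcd a b = Nat.gcd (2 * (a / 2)) (2 * (b / 2)) := by
              rw [show 2 * (a / 2) = a by omega, show 2 * (b / 2) = b by omega]
          _ = 2 * Nat.gcd (a / 2) (b / 2) := Nat.gcd_mul_left 2 (a / 2) (b / 2)
      rw [hgcd, pow_succ]
      ring
    · rw [if_neg h]
      refine ⟨ha, hb, ?_, ?_⟩
      · show a % 2 = 1 ∨ b % 2 = 1
        omega
      · show 2 ^ k * Nat.gcd a b = 2 ^ k * Nat.gcd a b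
        rfl

-- the subtraction loop computes the gcd of two odd numbers
theorem subLoopF_gcd : ∀ (f a b : Nat), a % 2 = 1 → (b = 0 ∨ b % 2 = 1) → a + b ≤ f →
    subLoopF f a b = Nat.gcd a b := by
  intro f
  induction f with
  | zero => intro a b ha hb hf; omega
  | succ f ih =>
    intro a b ha hb hf
    rw [subLoopF]
    by_cases hb0 : b = 0
    · rw [if_pos hb0, hb0, Nat.gcd_zero_right]
    · rw [if_neg hb0]
      have hbodd : b % 2 = 1 := by tauto
      -- the (possibly swapped) pair
      by_cases hab : a > b
      · simp only [if_pos hab]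
        by_cases hd : a - b = 0
        · omega
        · obtain ⟨p1, p2, p3, p4⟩ := halvePosF_spec (a - b) (a - b) le_rfl (by omega)
          rw [ih b (halvePosF (a - b) (a - b)) hbodd (Or.inr p2) (by omega)]
          rw [p4 b hbodd, Nat.gcd_sub_self_right (by omega : b ≤ a), Nat.gcd_comm]
      · simp only [if_neg hab]
        by_cases hd : b - a = 0
        · have hba : a = b := by omega
          have h0 : halvePosF (b - a) (b - a) = 0 := by rw [hd]; rfl
          rw [h0, show Nat.gcd a b = a by rw [hba, Nat.gcd_self]]
          cases f with
          | zero => rfl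
          | succ f => rw [subLoopF, if_pos rfl]
        · obtain ⟨p1, p2, p3, p4⟩ := halvePosF_spec (b - a) (b - a) le_rfl (by omega)
          rw [ih a (halvePosF (b - a) (b - a)) ha (Or.inr p2) (by omega)]
          rw [p4 a ha, Nat.gcd_sub_self_right (by omega : a ≤ b)]

-- Source B's binary_gcd computes Int.gcd
theorem binary_gcd_eq_gcd (x y : Int) : binary_gcd x y = (Int.gcd x y : Int) := by
  unfold binary_gcd
  by_cases hx : x.natAbs = 0
  · simp [hx, Int.gcd]
  · rw [if_neg hx]
    by_cases hy : y.natAbs = 0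
    · simp [hy, Int.gcd]
    · rw [if_neg hy]
      obtain ⟨t1, t2, t3, t4⟩ :=
        halveBothF_spec x.natAbs x.natAbs y.natAbs 0 le_rfl (by omega) (by omega)
      set t := halveBothF x.natAbs x.natAbs y.natAbs 0 with ht
      show ((subLoopF (halveOddF t.1 t.1 + halveOddF t.2.1 t.2.1) (halveOddF t.1 t.1)
              (halveOddF t.2.1 t.2.1) * 2 ^ t.2.2 : Nat) : Int) = (Int.gcd x y : Int)
      obtain ⟨a1, a2, a3⟩ := halveOddF_spec t.1 t.1 le_rfl t1
      obtain ⟨b1, b2, b3⟩ := halveOddF_spec t.2.1 t.2.1 le_rfl t2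
      have hgcd1 : Nat.gcd (halveOddF t.1 t.1) (halveOddF t.2.1 t.2.1) = Nat.gcd t.1 t.2.1 := by
        rcases t3 with hodd | hodd
        · rw [halveOddF_of_odd t.1 t.1 hodd, b3 t.1 hodd]
        · rw [halveOddF_of_odd t.2.1 t.2.1 hodd, Nat.gcd_comm, a3 _ hodd, Nat.gcd_comm]
      rw [subLoopF_gcd (halveOddF t.1 t.1 + halveOddF t.2.1 t.2.1)
            (halveOddF t.1 t.1) (halveOddF t.2.1 t.2.1) a2 (Or.inr b2) le_rfl]
      rw [hgcd1]
      have h5 : 2 ^ t.2.2 * Nat.gcd t.1 t.2.1 = Int.gcd x y := by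
        simpa [Int.gcd] using t4
      exact congrArg (Nat.cast : Nat → Int) (by rw [← h5]; ring)

-- the main induction: with the same fuel A's recursion and B's loop agree on Pre_
theorem prime_reduceF_eq_alt : ∀ (f : Nat) (n g : Int), 1 ≤ g → (n < 0 ∨ g ≤ n) →
    n.natAbs < f → prime_reduceF f n g = prime_reduce_altF f n g := by
  intro f
  induction f with
  | zero => intro n g hg hn hf; omega
  | succ f ih =>
    intro n g hg hn hf
    have hg0 : (0 : Int) < g := hg
    have hfd : PySem.Int.floordiv n g = n / g := PySem.Int.floordiv_eq_ediv_of_pos hg0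
    have hA : gcd_division (n / g) g = (Int.gcd (n / g) g : Int) :=
      gcd_divisionF_eq_gcd g.natAbs (n / g) g hg0 le_rfl
    have hB : binary_gcd (n / g) g = (Int.gcd (n / g) g : Int) := binary_gcd_eq_gcd (n / g) g
    simp only [prime_reduceF, prime_reduce_altF, hfd, hA, hB]
    set q := n / g with hq
    by_cases h1 : q = 1
    · simp [h1]
    · rw [if_neg h1, if_neg h1]
      by_cases h2 : (Int.gcd q g : Int) = 1
      · simp [h2]
      · rw [if_neg h2, if_neg h2]
        have hGpos : (0 : Int) < (Int.gcd q g : Int) := by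
          exact_mod_cast Int.gcd_pos_of_ne_zero_right q (show g ≠ 0 by omega)
        have hg2 : 2 ≤ g := by
          rcases (show g = 1 ∨ 2 ≤ g by omega) with h | h
          · exact absurd (by rw [h]; simp [Int.gcd] : (Int.gcd q g : Int) = 1) h2
          · exact h
        have hmod := Int.emod_nonneg n (show g ≠ 0 by omega)
        have hmodlt := Int.emod_lt_of_pos n hg0
        have hsum := Int.mul_ediv_add_emod n g
        rcases hn with hneg | hpos
        · -- n < 0: q < 0, and |q| < |n| since q = -1 is excluded by gcd ≠ 1
          have hqneg : q < 0 := ediv_neg_of_neg_of_pos n g hneg hg0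
          have hqne : q ≠ -1 := by
            intro hq1
            exact absurd (by rw [hq1]; simp [Int.gcd] : (Int.gcd q g : Int) = 1) h2
          have hq2 : q ≤ -2 := by omega
          have hdec : n < q := by nlinarith
          exact ih q (Int.gcd q g : Int) hGpos (Or.inl hqneg) (by omega)
        · -- 0 < g ≤ n: 1 ≤ q < n and gcd q g divides q
          have hq1' : 1 ≤ q := (Int.le_ediv_iff_mul_le hg0).mpr (by omega)
          have hdec : q < n := by nlinarith
          have hGle : (Int.gcd q g : Int) ≤ q := Int.le_of_dvd (by omega) (Int.gcd_dvd_left q g)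
          exact ih q (Int.gcd q g : Int) hGpos (Or.inr hGle) (by omega)

-- ===== VERDICT (by name: the statement is the Claim_ definition above) =====
theorem prime_reduce_spec : Claim_equal_prime_reduce := by
  intro n g _ hpre
  unfold Spec_prime_reduce prime_reduce prime_reduce_alt
  exact prime_reduceF_eq_alt (n.natAbs + 2) n g hpre.1 hpre.2 (by omega)
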